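-- pv_equiv track=rewrite | github.com/lucas-larsson/aoc | 2025/python/day_06_improved.py | part_one_functional
-- ===== SOURCE A (Python) =====
-- import math
-- from typing import List
--
-- def part_one_functional(math_sheet: List[str]) -> int:
--     """Alternative: More functional/compact approach for Part 1"""
--     rows = [line.split() for line in math_sheet]
--     ops = rows[-1]
--     nums = rows[:-1]
--
--     return sum(
--         sum(int(row[i]) for row in nums) if op == "+" else math.prod(int(row[i]) for row in nums)
--         for i, op in enumerate(ops)
--     )
-- ===== SOURCE B (Python) =====
-- def part_one_functional(math_sheet):
--     """Single row-major pass maintaining one accumulator per column."""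
--     rows = [line.split() for line in math_sheet]
--     ops = rows[-1]
--     nums = rows[:-1]
--     acc = [0 if op == "+" else 1 for op in ops]
--     for row in nums:
--         for i, op in enumerate(ops):
--             if op == "+":
--                 acc[i] += int(row[i])
--             else:
--                 acc[i] *= int(row[i])
--     return sum(acc)
-- ===== Notes on version B (the rewrite author's own statement) =====
-- stated objective: alternative
-- what changed: A re-scans all number rows once per column (column-major nested generators with sum/math.prod); B makes a single row-major pass over the number rows, maintaining a per-column accumulator list initialised to the operator's identity, then sums the accumulators.
import Mathlib
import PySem

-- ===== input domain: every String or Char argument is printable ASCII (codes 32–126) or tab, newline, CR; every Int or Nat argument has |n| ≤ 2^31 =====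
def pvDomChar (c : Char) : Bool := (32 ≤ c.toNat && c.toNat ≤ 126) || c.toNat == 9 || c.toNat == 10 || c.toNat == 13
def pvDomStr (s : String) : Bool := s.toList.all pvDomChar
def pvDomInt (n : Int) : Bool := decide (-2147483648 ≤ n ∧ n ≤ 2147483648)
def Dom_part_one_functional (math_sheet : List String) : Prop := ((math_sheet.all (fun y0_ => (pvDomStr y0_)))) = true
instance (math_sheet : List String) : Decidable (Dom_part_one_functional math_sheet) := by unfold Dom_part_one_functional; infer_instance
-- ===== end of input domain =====

-- B makes one row-major pass with a per-column accumulator list instead of A's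
-- column-major re-scan of all number rows per operator; same asymptotic cost (alternative decomposition).

-- ===== PORT A =====
-- int(row[i]) for an in-range index i (Pre_ guarantees range and parseability; defaults are never hit under Pre_)
def pvColv (row : List String) (i : Int) : Int :=
  (PySem.Int.ofStr? (PySem.List.pyGetD row i "")).getD 0

def part_one_functional (math_sheet : List String) : Int :=
  let rows := math_sheet.map PySem.Str.split₀
  let ops := (PySem.List.pyGet? rows (-1)).getD []
  let nums := PySem.List.slice rows none (some (-1))
  ((PySem.List.enumerate ops).map (fun p =>
    if p.2 == "+" then (nums.map (fun row => pvColv row p.1)).sum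
    else (nums.map (fun row => pvColv row p.1)).prod)).sum

-- ===== PORT B =====
-- inner loop 'for i, op in enumerate(ops): acc[i] = acc[i] ⊕ int(row[i])' over the aligned acc
def pvStepRow (ops : List String) (row : List String) (acc : List Int) : List Int :=
  (PySem.List.enumerate (ops.zip acc)).map (fun p =>
    if p.2.1 == "+" then p.2.2 + pvColv row p.1 else p.2.2 * pvColv row p.1)

def part_one_functional_alt (math_sheet : List String) : Int :=
  let rows := math_sheet.map PySem.Str.split₀
  let ops := (PySem.List.pyGet? rows (-1)).getD []
  let nums := PySem.List.slice rows none (some (-1))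
  let acc0 := ops.map (fun op => if op == "+" then (0 : Int) else 1)
  (nums.foldl (fun acc row => pvStepRow ops row acc) acc0).sum

-- ===== PRECONDITION & SPEC =====
-- Pre_ excludes exactly the inputs where Python A raises: the empty sheet (rows[-1] IndexError),
-- a number row shorter than the operator row (IndexError), or a token int() rejects (ValueError).
def Pre_part_one_functional (math_sheet : List String) : Prop :=
  math_sheet ≠ [] ∧
  ∀ row ∈ (math_sheet.map PySem.Str.split₀).dropLast,
    ∀ i < ((math_sheet.map PySem.Str.split₀).getLast?.getD []).length,
      i < row.length ∧ (PySem.Int.ofStr? (row.getD i "")).isSome = true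
instance (math_sheet : List String) : Decidable (Pre_part_one_functional math_sheet) := by
  unfold Pre_part_one_functional; infer_instance
def pvWitness_part_one_functional : List String := ["1 2", "3 4", "+ *"]
def Spec_part_one_functional (math_sheet : List String) (out : Int) : Prop := out = part_one_functional_alt math_sheet
instance (math_sheet : List String) (out : Int) : Decidable (Spec_part_one_functional math_sheet out) := by unfold Spec_part_one_functional; infer_instance

-- ===== CLAIM (what is proved, stated in full; the proofs are below) =====
def Claim_equal_part_one_functional : Prop := ∀ (math_sheet : List String), Dom_part_one_functional math_sheet → Pre_part_one_functional math_sheet → Spec_part_one_functional math_sheet (part_one_functional math_sheet)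

-- ===== LEMMAS AND PROOFS =====

-- One fold step keeps the accumulator aligned with ops.
lemma length_pvStepRow (ops row : List String) (acc : List Int) (h : acc.length = ops.length) :
    (pvStepRow ops row acc).length = ops.length := by
  simp [pvStepRow, PySem.List.length_enumerate, h]

-- Loop invariant: folding the remaining rows turns acc[i] into acc[i] + Σ column / acc[i] * Π column.
lemma foldl_pvStepRow (ops : List String) (nums : List (List String)) :
    ∀ acc : List Int, acc.length = ops.length →
    nums.foldl (fun acc row => pvStepRow ops row acc) acc =
      (PySem.List.enumerate (ops.zip acc)).map (fun p =>
        if p.2.1 == "+" then p.2.2 + (nums.map (fun row => pvColv row p.1)).sum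
        else p.2.2 * (nums.map (fun row => pvColv row p.1)).prod) := by
  induction nums with
  | nil =>
    intro acc h
    simp only [List.foldl_nil, List.map_nil, List.sum_nil, List.prod_nil, add_zero, mul_one,
      ite_self]
    calc acc = (ops.zip acc).map Prod.snd := by rw [List.map_snd_zip]; omega
      _ = ((PySem.List.enumerate (ops.zip acc)).map (fun p => p.2)).map Prod.snd := by
            rw [PySem.List.map_snd_enumerate]
      _ = (PySem.List.enumerate (ops.zip acc)).map (fun p => p.2.2) := by rw [List.map_map]; rfl
  | cons r rest ih =>
    intro acc h
    have h' : (pvStepRow ops r acc).length = ops.length := length_pvStepRow ops r acc h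
    rw [List.foldl_cons, ih _ h']
    apply List.ext_getElem
    · simp [PySem.List.length_enumerate, h, h']
    · intro k hk1 hk2
      have hko : k < ops.length := by
        simpa [PySem.List.length_enumerate, h'] using hk1
      have hka : k < acc.length := by omega
      have hkz : k < (ops.zip acc).length := by simp [List.length_zip]; omega
      have hkz' : k < (ops.zip (pvStepRow ops r acc)).length := by
        simp [List.length_zip, h']; omega
      have hstep : (pvStepRow ops r acc)[k]'(by omega) =
          if ops[k] == "+" then acc[k] + pvColv r k else acc[k] * pvColv r k := by
        simp [pvStepRow, PySem.List.getElem_enumerate, List.getElem_zip]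
      simp only [List.getElem_map, PySem.List.getElem_enumerate, List.getElem_zip, hstep,
        List.map_cons, List.sum_cons, List.prod_cons]
      by_cases hop : ops[k] == "+" <;> simp [hop] <;> ring

-- ===== VERDICT (by name: the statement is the Claim_ definition above) =====
theorem part_one_functional_spec : Claim_equal_part_one_functional := by
  intro ms _ _
  unfold Spec_part_one_functional part_one_functional part_one_functional_alt
  dsimp only
  set rows := ms.map PySem.Str.split₀ with hrows
  set ops := (PySem.List.pyGet? rows (-1)).getD [] with hops
  set nums := PySem.List.slice rows none (some (-1)) with hnums
  rw [foldl_pvStepRow ops nums (ops.map (fun op => if op == "+" then (0 : Int) else 1))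
        (by simp)]
  congr 1
  apply List.ext_getElem
  · simp [PySem.List.length_enumerate]
  · intro k hk1 hk2
    have hko : k < ops.length := by
      simpa [PySem.List.length_enumerate] using hk2
    simp only [List.getElem_map, PySem.List.getElem_enumerate, List.getElem_zip]
    by_cases hop : ops[k] == "+" <;> simp [hop]
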